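-- pv_equiv track=rewrite | github.com/Sahil624/qToolkit | dev/metadata_generator.py | _concepts_may_relate
-- ===== SOURCE A (Python) =====
-- from typing import List, Dict, Optional, Tuple
--
-- def _concepts_may_relate(current: List[str], prior: List[str]) -> bool:
--     """Quick heuristic to check if concepts might be related."""
--     # Convert to lowercase for comparison
--     current_lower = {c.lower() for c in current}
--     prior_lower = {c.lower() for c in prior}
--
--     # Direct overlap
--     if current_lower & prior_lower:
--         return True
--
--     # Check for partial matches (e.g., "Qubit" in "Qubit Transformations")
--     for curr in current_lower:
--         for pr in prior_lower:
--             if curr in pr or pr in curr: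
--                 return True
--             # Check individual words
--             curr_words = set(curr.split())
--             pr_words = set(pr.split())
--             if curr_words & pr_words:
--                 return True
--
--     return False
-- ===== SOURCE B (Python) =====
-- def _concepts_may_relate(current, prior):
--     """Quick heuristic to check if concepts might be related."""
--     current_lower = [c.lower() for c in current]
--     prior_lower = [p.lower() for p in prior]
--     # One union word-set per side, built once (replaces the per-pair word split).
--     current_words = set()
--     for c in current_lower:
--         current_words.update(c.split())
--     prior_words = set()
--     for p in prior_lower:
--         prior_words.update(p.split())
--     if current_words & prior_words:
--         return True
--     # Substring containment also covers exact (direct-overlap) matches.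
--     return any(c in p or p in c for c in current_lower for p in prior_lower)
-- ===== Notes on version B (the rewrite author's own statement) =====
-- stated objective: alternative
-- what changed: B builds one union word-set per side up front and tests a single set intersection, instead of A's per-pair word splitting and per-pair intersections inside the nested loop; the remaining nested loop does only the substring test, which subsumes A's separate direct-overlap set check.
import Mathlib
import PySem

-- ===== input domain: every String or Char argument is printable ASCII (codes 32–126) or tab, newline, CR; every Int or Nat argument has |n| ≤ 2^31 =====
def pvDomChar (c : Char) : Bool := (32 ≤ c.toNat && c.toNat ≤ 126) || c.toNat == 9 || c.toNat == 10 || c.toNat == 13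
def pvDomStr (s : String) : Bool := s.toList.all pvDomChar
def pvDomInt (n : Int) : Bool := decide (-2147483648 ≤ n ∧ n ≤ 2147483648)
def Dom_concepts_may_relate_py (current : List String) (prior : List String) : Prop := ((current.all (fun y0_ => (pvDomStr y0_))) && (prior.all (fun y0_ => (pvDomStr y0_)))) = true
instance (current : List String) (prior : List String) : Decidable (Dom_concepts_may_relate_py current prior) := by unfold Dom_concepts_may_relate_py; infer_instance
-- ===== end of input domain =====

-- B restructures the heuristic: one union word-set per side with a single
-- intersection test, then a nested loop for the substring test only (which
-- subsumes A's separate direct-overlap set check). Same cost class; alternative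
-- decomposition.

-- ===== PORT A =====
def concepts_may_relate_py (current : List String) (prior : List String) : Bool :=
  let currentLower : PySem.Set String := PySem.Set.ofList (current.map PySem.Str.lower)
  let priorLower : PySem.Set String := PySem.Set.ofList (prior.map PySem.Str.lower)
  -- if current_lower & prior_lower: return True
  if PySem.Set.inter currentLower priorLower ≠ [] then true
  else
    -- nested for-loops with early 'return True' (result is order-independent)
    currentLower.any (fun curr => priorLower.any (fun pr =>
      if PySem.Str.isIn curr pr || PySem.Str.isIn pr curr then true
      else
        let currWords : PySem.Set String := PySem.Set.ofList (PySem.Str.split₀ curr)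
        let prWords : PySem.Set String := PySem.Set.ofList (PySem.Str.split₀ pr)
        PySem.Set.inter currWords prWords ≠ []))

-- ===== PORT B =====
def concepts_may_relate_py_alt (current : List String) (prior : List String) : Bool :=
  let currentLower := current.map PySem.Str.lower
  let priorLower := prior.map PySem.Str.lower
  let currentWords : PySem.Set String :=
    currentLower.foldl (fun s c => PySem.Set.update s (PySem.Str.split₀ c)) PySem.Set.empty
  let priorWords : PySem.Set String :=
    priorLower.foldl (fun s p => PySem.Set.update s (PySem.Str.split₀ p)) PySem.Set.empty
  if PySem.Set.inter currentWords priorWords ≠ [] then true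
  else
    currentLower.any (fun c => priorLower.any (fun p =>
      PySem.Str.isIn c p || PySem.Str.isIn p c))

-- ===== PRECONDITION & SPEC =====
def Spec_concepts_may_relate_py (current : List String) (prior : List String) (out : Bool) : Prop := out = concepts_may_relate_py_alt current prior
instance (current : List String) (prior : List String) (out : Bool) : Decidable (Spec_concepts_may_relate_py current prior out) := by unfold Spec_concepts_may_relate_py; infer_instance

-- ===== CLAIM (what is proved, stated in full; the proofs are below) =====
def Claim_equal_concepts_may_relate_py : Prop := ∀ (current : List String) (prior : List String), Dom_concepts_may_relate_py current prior → Spec_concepts_may_relate_py current prior (concepts_may_relate_py current prior)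

-- ===== LEMMAS AND PROOFS =====

-- membership in the fold that builds a side's union word-set
theorem mem_foldl_update_split (l : List String) (s : PySem.Set String) (w : String) :
    w ∈ l.foldl (fun s c => PySem.Set.update s (PySem.Str.split₀ c)) s ↔
      w ∈ s ∨ ∃ c ∈ l, w ∈ PySem.Str.split₀ c := by
  induction l generalizing s with
  | nil => simp
  | cons c l ih =>
    simp only [List.foldl_cons, ih, PySem.Set.mem_update, List.mem_cons]
    aesop

theorem mem_ofList_iff {α : Type} [BEq α] [LawfulBEq α] (xs : List α) (x : α) :
    x ∈ PySem.Set.ofList xs ↔ x ∈ xs := by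
  rw [PySem.Set.mem_ofList]

theorem isIn_self (s : String) : PySem.Str.isIn s s = true := by
  simp [PySem.Chars.isIn_iff_infix]

theorem inter_ne_nil_iff {α : Type} [BEq α] [LawfulBEq α] (s t : List α) :
    PySem.Set.inter s t ≠ [] ↔ ∃ x ∈ s, x ∈ t := by
  constructor
  · intro h
    obtain ⟨x, hx⟩ := List.exists_mem_of_ne_nil _ h
    exact ⟨x, (PySem.Set.mem_inter s t x).mp hx⟩
  · rintro ⟨x, hx, hx'⟩ hnil
    have hx2 := (PySem.Set.mem_inter s t x).mpr ⟨hx, hx'⟩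
    rw [hnil] at hx2
    simp at hx2

theorem A_true_iff (current prior : List String) :
    concepts_may_relate_py current prior = true ↔
      ∃ c ∈ current, ∃ p ∈ prior,
        ((PySem.Str.isIn (PySem.Str.lower c) (PySem.Str.lower p)
          || PySem.Str.isIn (PySem.Str.lower p) (PySem.Str.lower c)) = true
         ∨ ∃ w, w ∈ PySem.Str.split₀ (PySem.Str.lower c)
              ∧ w ∈ PySem.Str.split₀ (PySem.Str.lower p)) := by
  unfold concepts_may_relate_py
  dsimp only
  split_ifs with h
  · simp only [true_iff]
    rw [inter_ne_nil_iff] at h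
    obtain ⟨x, hx, hx'⟩ := h
    rw [PySem.Set.mem_ofList] at hx hx'
    obtain ⟨c, hc, rfl⟩ := List.mem_map.mp hx
    obtain ⟨p, hp, hep⟩ := List.mem_map.mp hx'
    exact ⟨c, hc, p, hp, Or.inl (by rw [hep, isIn_self]; simp)⟩
  · rw [List.any_eq_true]
    constructor
    · rintro ⟨x, hx, hxy⟩
      rw [List.any_eq_true] at hxy
      obtain ⟨y, hy, hxy⟩ := hxy
      rw [PySem.Set.mem_ofList] at hx hy
      obtain ⟨c, hc, rfl⟩ := List.mem_map.mp hx
      obtain ⟨p, hp, rfl⟩ := List.mem_map.mp hy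
      refine ⟨c, hc, p, hp, ?_⟩
      by_cases hsub : (PySem.Str.isIn (PySem.Str.lower c) (PySem.Str.lower p)
          || PySem.Str.isIn (PySem.Str.lower p) (PySem.Str.lower c)) = true
      · exact Or.inl hsub
      · right
        rw [if_neg hsub, decide_eq_true_iff, inter_ne_nil_iff] at hxy
        obtain ⟨w, hw, hw'⟩ := hxy
        rw [PySem.Set.mem_ofList] at hw hw'
        exact ⟨w, hw, hw'⟩
    · rintro ⟨c, hc, p, hp, hcp⟩
      refine ⟨PySem.Str.lower c, (mem_ofList_iff _ _).mpr (List.mem_map_of_mem hc), ?_⟩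
      rw [List.any_eq_true]
      refine ⟨PySem.Str.lower p, (mem_ofList_iff _ _).mpr (List.mem_map_of_mem hp), ?_⟩
      rcases hcp with hsub | ⟨w, hw, hw'⟩
      · rw [if_pos hsub]
      · by_cases hsub : (PySem.Str.isIn (PySem.Str.lower c) (PySem.Str.lower p)
            || PySem.Str.isIn (PySem.Str.lower p) (PySem.Str.lower c)) = true
        · rw [if_pos hsub]
        · rw [if_neg hsub, decide_eq_true_iff, inter_ne_nil_iff]
          exact ⟨w, (mem_ofList_iff _ _).mpr hw, (mem_ofList_iff _ _).mpr hw'⟩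

theorem B_true_iff (current prior : List String) :
    concepts_may_relate_py_alt current prior = true ↔
      (∃ w, (∃ c ∈ current, w ∈ PySem.Str.split₀ (PySem.Str.lower c))
          ∧ (∃ p ∈ prior, w ∈ PySem.Str.split₀ (PySem.Str.lower p)))
      ∨ ∃ c ∈ current, ∃ p ∈ prior,
          (PySem.Str.isIn (PySem.Str.lower c) (PySem.Str.lower p)
           || PySem.Str.isIn (PySem.Str.lower p) (PySem.Str.lower c)) = true := by
  unfold concepts_may_relate_py_alt
  dsimp only
  have hmem : ∀ (l : List String) (w : String),
      w ∈ l.foldl (fun s c => PySem.Set.update s (PySem.Str.split₀ c)) PySem.Set.empty ↔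
        ∃ c ∈ l, w ∈ PySem.Str.split₀ c := by
    intro l w
    rw [mem_foldl_update_split]
    simp [PySem.Set.empty]
  split_ifs with h
  · simp only [true_iff]
    rw [inter_ne_nil_iff] at h
    obtain ⟨w, hw, hw'⟩ := h
    rw [hmem] at hw hw'
    obtain ⟨cl, hcl, hwc⟩ := hw
    obtain ⟨pl, hpl, hwp⟩ := hw'
    obtain ⟨c, hc, rfl⟩ := List.mem_map.mp hcl
    obtain ⟨p, hp, rfl⟩ := List.mem_map.mp hpl
    exact Or.inl ⟨w, ⟨c, hc, hwc⟩, ⟨p, hp, hwp⟩⟩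
  · rw [List.any_eq_true]
    constructor
    · rintro ⟨x, hx, hxy⟩
      rw [List.any_eq_true] at hxy
      obtain ⟨y, hy, hxy⟩ := hxy
      obtain ⟨c, hc, rfl⟩ := List.mem_map.mp hx
      obtain ⟨p, hp, rfl⟩ := List.mem_map.mp hy
      exact Or.inr ⟨c, hc, p, hp, hxy⟩
    · rintro (⟨w, ⟨c, hc, hwc⟩, ⟨p, hp, hwp⟩⟩ | ⟨c, hc, p, hp, hsub⟩)
      · exact absurd ((inter_ne_nil_iff _ _).mpr
          ⟨w, (hmem _ _).mpr ⟨PySem.Str.lower c, List.mem_map_of_mem hc, hwc⟩,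
              (hmem _ _).mpr ⟨PySem.Str.lower p, List.mem_map_of_mem hp, hwp⟩⟩) h
      · refine ⟨PySem.Str.lower c, List.mem_map_of_mem hc, ?_⟩
        rw [List.any_eq_true]
        exact ⟨PySem.Str.lower p, List.mem_map_of_mem hp, hsub⟩

-- ===== VERDICT (by name: the statement is the Claim_ definition above) =====
set_option maxHeartbeats 1000000 in
theorem concepts_may_relate_py_spec : Claim_equal_concepts_may_relate_py := by
  intro current prior _
  unfold Spec_concepts_may_relate_py
  rw [Bool.eq_iff_iff, A_true_iff, B_true_iff]
  constructor
  · rintro ⟨c, hc, p, hp, hsub | ⟨w, hw, hw'⟩⟩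
    · exact Or.inr ⟨c, hc, p, hp, hsub⟩
    · exact Or.inl ⟨w, ⟨c, hc, hw⟩, ⟨p, hp, hw'⟩⟩
  · rintro (⟨w, ⟨c, hc, hw⟩, ⟨p, hp, hw'⟩⟩ | ⟨c, hc, p, hp, hsub⟩)
    · exact ⟨c, hc, p, hp, Or.inr ⟨w, hw, hw'⟩⟩
    · exact ⟨c, hc, p, hp, Or.inl hsub⟩
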